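-- pv_equiv track=rewrite | github.com/Jarkendar/Note_Recognizer | Files/Main.py | divideImageOnParts
-- ===== SOURCE A (Python) =====
-- def divideImageOnParts(image, starts, stops):
--     parts = []
--     part = []
--     rewrite = False
--     for i in range(len(image)):
--         if not rewrite and i in starts:
--             rewrite = True
--             part = []
--         if rewrite and i in stops:
--             rewrite = False
--             parts.append(part)
--         if rewrite:
--             part.append(image[i] * 1)
--     return parts
-- ===== SOURCE B (Python) =====
-- def divideImageOnParts(image, starts, stops):
--     n = len(image)
--     parts = []
--     p = 0
--     while True:
--         s = next((i for i in range(p, n) if i in starts), None)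
--         if s is None:
--             break
--         t = next((i for i in range(s, n) if i in stops), None)
--         if t is None:
--             break
--         parts.append([image[i] * 1 for i in range(s, t)])
--         p = t + 1
--     return parts
-- ===== Notes on version B (the rewrite author's own statement) =====
-- stated objective: alternative
-- what changed: Replaced A's single-pass boolean-flag state machine (per-row rewrite flag with an accumulating part buffer) by a cursor loop that searches for the next start and next stop boundary and emits each part as one slice-comprehension over the interval.
import Mathlib
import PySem

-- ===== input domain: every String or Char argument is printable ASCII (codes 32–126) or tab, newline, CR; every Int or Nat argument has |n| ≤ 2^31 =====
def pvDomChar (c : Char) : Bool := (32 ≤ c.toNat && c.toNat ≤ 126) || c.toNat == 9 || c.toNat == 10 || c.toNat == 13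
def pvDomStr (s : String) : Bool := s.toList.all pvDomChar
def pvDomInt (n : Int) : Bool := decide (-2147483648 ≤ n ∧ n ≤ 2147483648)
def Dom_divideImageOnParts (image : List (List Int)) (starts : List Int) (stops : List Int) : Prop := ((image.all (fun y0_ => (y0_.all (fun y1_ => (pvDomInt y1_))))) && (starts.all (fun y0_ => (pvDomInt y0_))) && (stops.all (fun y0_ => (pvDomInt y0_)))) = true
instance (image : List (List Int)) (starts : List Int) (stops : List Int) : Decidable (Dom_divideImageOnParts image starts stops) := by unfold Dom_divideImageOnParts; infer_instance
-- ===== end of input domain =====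

-- B replaces A's per-row flag machine with a cursor that finds start/stop boundaries and slices each part out; objective: alternative decomposition (same cost).

-- ===== PORT A =====
-- one iteration of A's for-loop body; state = (parts, part, rewrite)
def pvAStep (image : List (List Int)) (starts : List Int) (stops : List Int)
    (st : List (List (List Int)) × List (List Int) × Bool) (i : Nat) :
    List (List (List Int)) × List (List Int) × Bool :=
  let parts := st.1
  let part := st.2.1
  let rewrite := st.2.2
  -- if not rewrite and i in starts: rewrite = True; part = []
  let pr := if !rewrite && starts.contains (i : Int) then (([] : List (List Int)), true) else (part, rewrite)
  let part := pr.1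
  let rewrite := pr.2
  -- if rewrite and i in stops: rewrite = False; parts.append(part)
  let pr2 := if rewrite && stops.contains (i : Int) then (parts ++ [part], false) else (parts, rewrite)
  let parts := pr2.1
  let rewrite := pr2.2
  -- if rewrite: part.append(image[i] * 1)   (i < len(image) always; row*1 is a copy = the row)
  let part := if rewrite then part ++ [image[i]?.getD []] else part
  (parts, part, rewrite)

def divideImageOnParts (image : List (List Int)) (starts : List Int) (stops : List Int) : List (List (List Int)) :=
  ((List.range image.length).foldl (pvAStep image starts stops) ([], [], false)).1

-- ===== PORT B =====
-- next((i for i in range(p, n) if i in xs), None)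
def pvFindFrom (p n : Nat) (xs : List Int) : Option Nat :=
  (List.range' p (n - p)).find? (fun i => xs.contains (i : Int))

-- find?-some on a range' gives bounds (used for termination of the cursor loop)
theorem pvFindFrom_bounds {p n : Nat} {xs : List Int} {s : Nat}
    (h : pvFindFrom p n xs = some s) : p ≤ s ∧ s < n := by
  have hm : s ∈ List.range' p (n - p) := List.mem_of_find?_eq_some h
  have := List.mem_range'_1.mp hm
  omega

-- the while-loop of B with cursor p
def pvAltLoop (image : List (List Int)) (starts : List Int) (stops : List Int)
    (n p : Nat) : List (List (List Int)) :=
  match hs : pvFindFrom p n starts with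
  | none => []
  | some s =>
    match ht : pvFindFrom s n stops with
    | none => []
    | some t =>
      ((List.range' s (t - s)).map (fun i => image[i]?.getD [])) ::
        pvAltLoop image starts stops n (t + 1)
termination_by n - p
decreasing_by
  have h1 := pvFindFrom_bounds hs
  have h2 := pvFindFrom_bounds ht
  omega

def divideImageOnParts_alt (image : List (List Int)) (starts : List Int) (stops : List Int) : List (List (List Int)) :=
  pvAltLoop image starts stops image.length 0

-- ===== PRECONDITION & SPEC =====
def Spec_divideImageOnParts (image : List (List Int)) (starts : List Int) (stops : List Int) (out : List (List (List Int))) : Prop := out = divideImageOnParts_alt image starts stops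
instance (image : List (List Int)) (starts : List Int) (stops : List Int) (out : List (List (List Int))) : Decidable (Spec_divideImageOnParts image starts stops out) := by unfold Spec_divideImageOnParts; infer_instance

-- ===== CLAIM (what is proved, stated in full; the proofs are below) =====
def Claim_equal_divideImageOnParts : Prop := ∀ (image : List (List Int)) (starts : List Int) (stops : List Int), Dom_divideImageOnParts image starts stops → Spec_divideImageOnParts image starts stops (divideImageOnParts image starts stops)

-- ===== LEMMAS AND PROOFS =====

theorem pvFindFrom_none_spec {p n : Nat} {xs : List Int}
    (h : pvFindFrom p n xs = none) :
    ∀ i : Nat, p ≤ i → i < n → xs.contains (i : Int) = false := by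
  intro i h1 h2
  by_contra hc
  have hb : xs.contains (i : Int) = true := by
    cases hx : xs.contains (i : Int) with
    | false => exact absurd hx hc
    | true => rfl
  have hmem : i ∈ List.range' p (n - p) := List.mem_range'_1.mpr (by omega)
  have hsome : (pvFindFrom p n xs).isSome := by
    rw [pvFindFrom]
    exact List.find?_isSome.mpr ⟨i, hmem, hb⟩
  rw [h] at hsome
  simp at hsome

theorem pvFindFrom_some_spec_aux (xs : List Int) (n k : Nat) :
    ∀ p s : Nat, n - p ≤ k → pvFindFrom p n xs = some s →
      xs.contains (s : Int) = true ∧ p ≤ s ∧ s < n ∧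
        (∀ i : Nat, p ≤ i → i < s → xs.contains (i : Int) = false) := by
  induction k with
  | zero =>
    intro p s hle h
    rw [pvFindFrom, show n - p = 0 from by omega] at h
    simp [List.range'] at h
  | succ m ih =>
    intro p s hle h
    rw [pvFindFrom] at h
    by_cases hpn : p < n
    · rw [show n - p = (n - (p + 1)) + 1 from by omega, List.range'_succ,
        List.find?_cons] at h
      cases hc : xs.contains ((p : Nat) : Int) with
      | true =>
        rw [hc] at h
        simp at h
        subst h
        exact ⟨hc, le_refl _, hpn, fun i h1 h2 => absurd h1 (by omega)⟩
      | false =>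
        rw [hc] at h
        simp only [] at h
        have h' : pvFindFrom (p + 1) n xs = some s := by rw [pvFindFrom]; exact h
        obtain ⟨c1, c2, c3, c4⟩ := ih (p + 1) s (by omega) h'
        refine ⟨c1, by omega, c3, fun i h1 h2 => ?_⟩
        by_cases hip : i = p
        · subst hip; exact hc
        · exact c4 i (by omega) h2
    · rw [show n - p = 0 from by omega] at h
      simp [List.range'] at h

theorem pvFindFrom_some_spec {p n : Nat} {xs : List Int} {s : Nat}
    (h : pvFindFrom p n xs = some s) :
    xs.contains (s : Int) = true ∧ p ≤ s ∧ s < n ∧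
      (∀ i : Nat, p ≤ i → i < s → xs.contains (i : Int) = false) :=
  pvFindFrom_some_spec_aux xs n (n - p) p s (le_refl _) h

-- unfolding pvAltLoop in its three cases (the named match makes direct rw awkward)
theorem pvAltLoop_none (image : List (List Int)) (starts stops : List Int) (n p : Nat)
    (h : pvFindFrom p n starts = none) :
    pvAltLoop image starts stops n p = [] := by
  rw [pvAltLoop]
  split
  · rfl
  · rename_i s hs'
    rw [h] at hs'
    cases hs'

theorem pvAltLoop_noStop (image : List (List Int)) (starts stops : List Int) (n p s : Nat)
    (h : pvFindFrom p n starts = some s) (h2 : pvFindFrom s n stops = none) :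
    pvAltLoop image starts stops n p = [] := by
  rw [pvAltLoop]
  split
  · rfl
  · rename_i s' hs'
    rw [h] at hs'
    injection hs' with hss
    subst hss
    split
    · rfl
    · rename_i t ht'
      rw [h2] at ht'
      cases ht'

theorem pvAltLoop_cons (image : List (List Int)) (starts stops : List Int) (n p s t : Nat)
    (h : pvFindFrom p n starts = some s) (h2 : pvFindFrom s n stops = some t) :
    pvAltLoop image starts stops n p =
      ((List.range' s (t - s)).map (fun i => image[i]?.getD [])) ::
        pvAltLoop image starts stops n (t + 1) := by
  rw [pvAltLoop]
  split
  · rename_i hs'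
    rw [h] at hs'
    cases hs'
  · rename_i s' hs'
    rw [h] at hs'
    injection hs' with hss
    subst hss
    split
    · rename_i ht'
      rw [h2] at ht'
      cases ht'
    · rename_i t' ht'
      rw [h2] at ht'
      injection ht' with htt
      subst htt
      rfl

-- helper: the fold while rewrite is false and no index is a start does nothing
theorem pvNoStart (image : List (List Int)) (starts stops : List Int)
    (k : Nat) :
    ∀ (p : Nat) (parts : List (List (List Int))) (part : List (List Int)),
      (∀ i : Nat, p ≤ i → i < p + k → starts.contains (i : Int) = false) →
      (List.range' p k).foldl (pvAStep image starts stops) (parts, part, false) = (parts, part, false) := by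
  induction k with
  | zero => intro p parts part _; simp
  | succ m ih =>
    intro p parts part hns
    rw [List.range'_succ, List.foldl_cons]
    have hmem : ¬ ((p : Int) ∈ starts) := by
      simpa using hns p (le_refl _) (by omega)
    have hstep : pvAStep image starts stops (parts, part, false) p = (parts, part, false) := by
      simp [pvAStep, hmem]
    rw [hstep]
    exact ih (p + 1) parts part (fun i h1 h2 => hns i (by omega) (by omega))

-- helper: the fold while rewrite is true and no index is a stop appends the rows
theorem pvNoStop (image : List (List Int)) (starts stops : List Int)
    (k : Nat) :
    ∀ (p : Nat) (parts : List (List (List Int))) (part : List (List Int)),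
      (∀ i : Nat, p ≤ i → i < p + k → stops.contains (i : Int) = false) →
      (List.range' p k).foldl (pvAStep image starts stops) (parts, part, true) =
        (parts, part ++ (List.range' p k).map (fun i => image[i]?.getD []), true) := by
  induction k with
  | zero => intro p parts part _; simp
  | succ m ih =>
    intro p parts part hns
    rw [List.range'_succ, List.foldl_cons]
    have hmem : ¬ ((p : Int) ∈ stops) := by
      simpa using hns p (le_refl _) (by omega)
    have hstep : pvAStep image starts stops (parts, part, true) p
        = (parts, part ++ [image[p]?.getD []], true) := by
      simp [pvAStep, hmem]
    rw [hstep, ih (p + 1) parts (part ++ [image[p]?.getD []])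
          (fun i h1 h2 => hns i (by omega) (by omega))]
    simp

-- main invariant: from a "rewrite = false" state at cursor p, A's remaining fold
-- produces exactly parts ++ (B's cursor loop from p)
theorem pvMain (image : List (List Int)) (starts stops : List Int) (n : Nat)
    (k : Nat) :
    ∀ (p : Nat) (parts : List (List (List Int))) (part : List (List Int)),
      n - p ≤ k →
      ((List.range' p (n - p)).foldl (pvAStep image starts stops) (parts, part, false)).1 =
        parts ++ pvAltLoop image starts stops n p := by
  induction k with
  | zero =>
    intro p parts part hle
    have h0 : n - p = 0 := by omega
    have hs : pvFindFrom p n starts = none := by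
      rw [pvFindFrom, h0]; simp [List.range']
    rw [h0, pvAltLoop_none image starts stops n p hs]
    simp
  | succ m ih =>
    intro p parts part hle
    cases hs : pvFindFrom p n starts with
    | none =>
      rw [pvAltLoop_none image starts stops n p hs]
      rw [pvNoStart image starts stops (n - p) p parts part
        (fun i h1 h2 => pvFindFrom_none_spec hs i h1 (by omega))]
      simp
    | some s =>
      obtain ⟨hcs, hps, hsn, hmin⟩ := pvFindFrom_some_spec hs
      have hcsm : ((s : Int) ∈ starts) := by simpa using hcs
      -- split the range at s
      have hsplit : List.range' p (n - p) = List.range' p (s - p) ++ List.range' s (n - s) := by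
        have h1 := @List.range'_append p (s - p) (n - s) 1
        simp only [one_mul] at h1
        rw [show p + (s - p) = s from by omega,
            show s - p + (n - s) = n - p from by omega] at h1
        exact h1.symm
      rw [hsplit, List.foldl_append]
      rw [pvNoStart image starts stops (s - p) p parts part
        (fun i h1 h2 => hmin i h1 (by omega))]
      -- one step at index s: rewrite turns on
      have hcons : List.range' s (n - s) = s :: List.range' (s + 1) (n - (s + 1)) := by
        rw [show n - s = (n - (s + 1)) + 1 from by omega, List.range'_succ]
      rw [hcons, List.foldl_cons]
      cases ht : pvFindFrom s n stops with
      | none =>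
        have hctsm : ¬ ((s : Int) ∈ stops) := by
          simpa using pvFindFrom_none_spec ht s (le_refl _) hsn
        have hstep : pvAStep image starts stops (parts, part, false) s
            = (parts, [image[s]?.getD []], true) := by
          simp [pvAStep, hcsm, hctsm]
        rw [hstep]
        rw [pvNoStop image starts stops (n - (s + 1)) (s + 1) parts _
          (fun i h1 h2 => pvFindFrom_none_spec ht i (by omega) (by omega))]
        rw [pvAltLoop_noStop image starts stops n p s hs ht]
        simp
      | some t =>
        obtain ⟨hct, hst, htn, hmint⟩ := pvFindFrom_some_spec ht
        have hctm : ((t : Int) ∈ stops) := by simpa using hct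
        rw [pvAltLoop_cons image starts stops n p s t hs ht]
        by_cases hts : t = s
        · -- coincident start/stop: empty part emitted
          subst hts
          have hstep : pvAStep image starts stops (parts, part, false) t
              = (parts ++ [[]], [], false) := by
            simp [pvAStep, hcsm, hctm]
          rw [hstep]
          rw [ih (t + 1) (parts ++ [[]]) [] (by omega)]
          simp
        · -- t > s: accumulate rows s..t-1, then stop at t
          have hlt : s < t := by omega
          have hctsm : ¬ ((s : Int) ∈ stops) := by
            simpa using hmint s (le_refl _) hlt
          have hstep : pvAStep image starts stops (parts, part, false) s
              = (parts, [image[s]?.getD []], true) := by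
            simp [pvAStep, hcsm, hctsm]
          rw [hstep]
          -- split [s+1, n) at t
          have hsplit2 : List.range' (s + 1) (n - (s + 1)) =
              List.range' (s + 1) (t - (s + 1)) ++ List.range' t (n - t) := by
            have h1 := @List.range'_append (s + 1) (t - (s + 1)) (n - t) 1
            simp only [one_mul] at h1
            rw [show s + 1 + (t - (s + 1)) = t from by omega,
                show t - (s + 1) + (n - t) = n - (s + 1) from by omega] at h1
            exact h1.symm
          rw [hsplit2, List.foldl_append]
          rw [pvNoStop image starts stops (t - (s + 1)) (s + 1) parts _
            (fun i h1 h2 => hmint i (by omega) (by omega))]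
          have hcons2 : List.range' t (n - t) = t :: List.range' (t + 1) (n - (t + 1)) := by
            rw [show n - t = (n - (t + 1)) + 1 from by omega, List.range'_succ]
          rw [hcons2, List.foldl_cons]
          set rows := [image[s]?.getD []] ++ (List.range' (s + 1) (t - (s + 1))).map (fun i => image[i]?.getD []) with hrows
          have hstep2 : pvAStep image starts stops (parts, rows, true) t
              = (parts ++ [rows], rows, false) := by
            simp [pvAStep, hctm]
          rw [hstep2]
          rw [ih (t + 1) (parts ++ [rows]) rows (by omega)]
          have hrows_eq : rows = (List.range' s (t - s)).map (fun i => image[i]?.getD []) := by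
            rw [hrows, show t - s = (t - (s + 1)) + 1 from by omega, List.range'_succ]
            simp
          rw [hrows_eq]
          simp

-- ===== VERDICT (by name: the statement is the Claim_ definition above) =====
theorem divideImageOnParts_spec : Claim_equal_divideImageOnParts := by
  intro image starts stops _
  unfold Spec_divideImageOnParts divideImageOnParts divideImageOnParts_alt
  have h := pvMain image starts stops image.length image.length 0 [] [] (by omega)
  simpa [List.range_eq_range'] using h
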